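-- pv_equiv track=rewrite | github.com/MrBrantCode/unitest_baseline | mut_generate/mist_train_cf/cf_49716/solution.py | can_sort
-- ===== SOURCE A (Python) =====
-- def can_sort(s, t):
--     # frequency counts
--     counts_s, counts_t = [0] * 10, [0] * 10
--     for ch_s, ch_t in zip(s, t):
--         # generate character frequency counts
--         counts_s[ord(ch_s)-ord('0')] += 1
--         counts_t[ord(ch_t)-ord('0')] += 1
--         # if at this point, any character in t has more
--         # occurrences than in s, return False
--         if any(a < b for a, b in zip(counts_s, counts_t)):
--             return False
--     # if we reached here it means we can sort s to get t
--     return True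
-- ===== SOURCE B (Python) =====
-- def can_sort(s, t):
--     # Per-digit single pass: for each digit keep a running prefix difference
--     # (occurrences in s minus occurrences in t); fail iff it ever goes negative.
--     for d in range(10):
--         diff = 0
--         for a, b in zip(s, t):
--             diff += (int(a) == d) - (int(b) == d)
--             if diff < 0:
--                 return False
--     return True
-- ===== Notes on version B (the rewrite author's own statement) =====
-- stated objective: alternative
-- what changed: Transposed the loops: instead of A's single pass maintaining two 10-bucket count arrays with an inner scan over all 10 buckets after every character, B makes one co-iterated (zip) pass per digit value keeping a single running prefix difference and returns False as soon as it goes negative.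
-- outside the precondition, e.g. on can_sort('0', '/'): A returns False, B raises ValueError; on can_sort('50x', '09x'): A returns False, B returns False
import Mathlib
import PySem

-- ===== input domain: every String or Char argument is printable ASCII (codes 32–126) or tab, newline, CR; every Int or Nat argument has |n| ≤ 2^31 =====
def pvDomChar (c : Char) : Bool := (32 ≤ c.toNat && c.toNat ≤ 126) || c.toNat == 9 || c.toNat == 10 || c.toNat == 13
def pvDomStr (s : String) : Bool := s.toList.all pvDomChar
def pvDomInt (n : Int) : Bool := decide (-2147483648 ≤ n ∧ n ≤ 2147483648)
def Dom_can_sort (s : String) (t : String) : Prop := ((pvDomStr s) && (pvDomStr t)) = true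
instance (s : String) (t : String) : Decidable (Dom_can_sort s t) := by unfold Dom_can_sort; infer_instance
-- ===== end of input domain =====

-- B transposes the loops: one zip pass per digit with a single running prefix
-- difference and early exit, instead of A's per-character 10-bucket count arrays
-- with an inner any-scan; objective: alternative (same asymptotic cost).


-- ===== PORT A =====
-- any(a < b for a, b in zip(counts_s, counts_t))
def pyAnyLt (cs ct : List Int) : Bool := (cs.zip ct).any (fun p => decide (p.1 < p.2))

-- counts[ord(ch)-ord('0')] += 1; pySetD/pyGetD are exact wherever Python does not
-- raise IndexError (all such inputs are excluded by Pre_can_sort)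
def goA : List (Char × Char) → List Int → List Int → Bool
  | [], _, _ => true
  | (a, b) :: rest, cs, ct =>
    let cs' := PySem.List.pySetD cs ((a.toNat : Int) - 48)
      (PySem.List.pyGetD cs ((a.toNat : Int) - 48) 0 + 1)
    let ct' := PySem.List.pySetD ct ((b.toNat : Int) - 48)
      (PySem.List.pyGetD ct ((b.toNat : Int) - 48) 0 + 1)
    if pyAnyLt cs' ct' then false else goA rest cs' ct'

def can_sort (s : String) (t : String) : Bool :=
  goA (s.toList.zip t.toList) (List.replicate 10 0) (List.replicate 10 0)

-- ===== PORT B =====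
-- inner zip loop for one digit d: running prefix difference, early False;
-- int(ch) is PySem.Int.ofChars? (none = Python's ValueError on a non-digit,
-- excluded by Pre_; the none branch only makes the function total there)
def goB (d : Int) : List (Char × Char) → Int → Bool
  | [], _ => true
  | (a, b) :: rest, diff =>
    match PySem.Int.ofChars? [a], PySem.Int.ofChars? [b] with
    | some x, some y =>
      let diff' := diff + (if x = d then (1 : Int) else 0) - (if y = d then (1 : Int) else 0)
      if diff' < 0 then false else goB d rest diff'
    | _, _ => false

def can_sort_alt (s : String) (t : String) : Bool :=
  (PySem.List.pyRange 0 10 1).all (fun d => goB d (s.toList.zip t.toList) 0)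

-- ===== PRECONDITION & SPEC =====
-- Pre_ restricts to the task's natural domain (digit strings, up to zip truncation).
-- Outside it B raises ValueError on the first co-iterated non-digit character, while
-- A raises IndexError there (character outside '&'..'9') or, when a non-digit lies in
-- the zipped prefix, returns a value shaped by negative-index wraparound or an earlier
-- early-exit (see claim cites).
def Pre_can_sort (s : String) (t : String) : Prop :=
  ∀ p ∈ s.toList.zip t.toList,
    (48 ≤ p.1.toNat ∧ p.1.toNat ≤ 57) ∧ (48 ≤ p.2.toNat ∧ p.2.toNat ≤ 57)
instance (s : String) (t : String) : Decidable (Pre_can_sort s t) := by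
  unfold Pre_can_sort; infer_instance

def pvWitness_can_sort : String × String := ("21", "12")

def Spec_can_sort (s : String) (t : String) (out : Bool) : Prop := out = can_sort_alt s t
instance (s : String) (t : String) (out : Bool) : Decidable (Spec_can_sort s t out) := by
  unfold Spec_can_sort; infer_instance

-- ===== CLAIM (what is proved, stated in full; the proofs are below) =====
def Claim_equal_can_sort : Prop :=
  ∀ (s : String) (t : String), Dom_can_sort s t → Pre_can_sort s t →
    Spec_can_sort s t (can_sort s t)

-- ===== LEMMAS AND PROOFS =====

-- signed count of pairs whose first (resp. second) char has code 48+j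
def cntF (j : Nat) (l : List (Char × Char)) : Int :=
  (l.countP (fun p => p.1.toNat == 48 + j) : Int)
def cntT (j : Nat) (l : List (Char × Char)) : Int :=
  (l.countP (fun p => p.2.toNat == 48 + j) : Int)

lemma cntF_nil (j : Nat) : cntF j [] = 0 := rfl
lemma cntT_nil (j : Nat) : cntT j [] = 0 := rfl

lemma cntF_cons (j : Nat) (a b : Char) (l : List (Char × Char)) :
    cntF j ((a, b) :: l) = (if a.toNat = 48 + j then 1 else 0) + cntF j l := by
  by_cases h : a.toNat = 48 + j
  · simp [cntF, h]
    omega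
  · simp [cntF, h]

lemma cntT_cons (j : Nat) (a b : Char) (l : List (Char × Char)) :
    cntT j ((a, b) :: l) = (if b.toNat = 48 + j then 1 else 0) + cntT j l := by
  by_cases h : b.toNat = 48 + j
  · simp [cntT, h]
    omega
  · simp [cntT, h]

def upd (l : List Int) (c : Char) : List Int :=
  l.set (c.toNat - 48) (l.getD (c.toNat - 48) 0 + 1)

lemma goA_cons (a b : Char) (r : List (Char × Char)) (cs ct : List Int)
    (ha : 48 ≤ a.toNat) (hb : 48 ≤ b.toNat) :
    goA ((a, b) :: r) cs ct =
      if pyAnyLt (upd cs a) (upd ct b) then false else goA r (upd cs a) (upd ct b) := by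
  have ea : ((a.toNat : Int) - 48) = ((a.toNat - 48 : Nat) : Int) := by omega
  have eb : ((b.toNat : Int) - 48) = ((b.toNat - 48 : Nat) : Int) := by omega
  simp [goA, ea, eb, upd, PySem.List.pySetD_natCast, PySem.List.pyGetD_natCast]

lemma length_upd (l : List Int) (c : Char) : (upd l c).length = l.length := by
  simp [upd]

lemma getD_upd (l : List Int) (c : Char) (hl : l.length = 10)
    (hc : 48 ≤ c.toNat ∧ c.toNat ≤ 57) (j : Nat) (hj : j < 10) :
    (upd l c).getD j 0 = l.getD j 0 + (if c.toNat = 48 + j then 1 else 0) := by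
  have h1 : j < (upd l c).length := by rw [length_upd]; omega
  have h2 : j < l.length := by omega
  rw [List.getD_eq_getElem _ _ h1, List.getD_eq_getElem _ _ h2]
  simp only [upd, List.getElem_set]
  by_cases h : c.toNat - 48 = j
  · have h' : c.toNat = 48 + j := by omega
    rw [if_pos h, if_pos h', h, List.getD_eq_getElem _ _ h2]
  · have h' : ¬ c.toNat = 48 + j := by omega
    rw [if_neg h, if_neg h']
    simp

lemma pyAnyLt_iff (cs ct : List Int) (h1 : cs.length = 10) (h2 : ct.length = 10) :
    pyAnyLt cs ct = true ↔ ∃ j, j < 10 ∧ cs.getD j 0 < ct.getD j 0 := by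
  unfold pyAnyLt
  rw [List.any_eq_true]
  constructor
  · rintro ⟨p, hp, hlt⟩
    obtain ⟨i, hi, rfl⟩ := List.mem_iff_getElem.mp hp
    have hi' : i < 10 := by simp [List.length_zip, h1, h2] at hi; omega
    refine ⟨i, hi', ?_⟩
    rw [List.getD_eq_getElem _ _ (by omega), List.getD_eq_getElem _ _ (by omega)]
    simpa [List.getElem_zip] using hlt
  · rintro ⟨j, hj, hlt⟩
    have hz : j < (cs.zip ct).length := by simp [List.length_zip, h1, h2]; omega
    refine ⟨(cs.zip ct)[j], List.mem_iff_getElem.mpr ⟨j, hz, rfl⟩, ?_⟩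
    rw [List.getD_eq_getElem _ _ (by omega), List.getD_eq_getElem _ _ (by omega)] at hlt
    simpa [List.getElem_zip] using hlt

lemma goA_iff (z : List (Char × Char))
    (hz : ∀ p ∈ z, (48 ≤ p.1.toNat ∧ p.1.toNat ≤ 57) ∧ (48 ≤ p.2.toNat ∧ p.2.toNat ≤ 57)) :
    ∀ (cs ct : List Int), cs.length = 10 → ct.length = 10 →
    (goA z cs ct = true ↔
      ∀ n : Nat, 1 ≤ n → n ≤ z.length → ∀ j < 10,
        ¬ (cs.getD j 0 + cntF j (z.take n) < ct.getD j 0 + cntT j (z.take n))) := by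
  induction z with
  | nil =>
    intro cs ct h1 h2
    simp [goA]
    intro n hn hn'; omega
  | cons p r ih =>
    obtain ⟨a, b⟩ := p
    intro cs ct h1 h2
    have hab := hz (a, b) (by simp)
    have ha : 48 ≤ a.toNat ∧ a.toNat ≤ 57 := by simpa using hab.1
    have hb : 48 ≤ b.toNat ∧ b.toNat ≤ 57 := by simpa using hab.2
    have hzr : ∀ p ∈ r, (48 ≤ p.1.toNat ∧ p.1.toNat ≤ 57) ∧ (48 ≤ p.2.toNat ∧ p.2.toNat ≤ 57) :=
      fun p hp => hz p (by simp [hp])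
    have h1' : (upd cs a).length = 10 := by rw [length_upd]; exact h1
    have h2' : (upd ct b).length = 10 := by rw [length_upd]; exact h2
    have etake : ((a, b) :: r).take 1 = [(a, b)] := rfl
    rw [goA_cons a b r cs ct ha.1 hb.1]
    by_cases hbad : pyAnyLt (upd cs a) (upd ct b) = true
    · rw [hbad]
      simp only [if_true]
      constructor
      · intro h; exact absurd h (by simp)
      · intro h
        obtain ⟨j, hj, hlt⟩ := (pyAnyLt_iff _ _ h1' h2').mp hbad
        have hthis := h 1 (by omega) (by simp) j hj
        rw [etake, cntF_cons, cntT_cons, cntF_nil, cntT_nil] at hthis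
        rw [getD_upd cs a h1 ha j hj, getD_upd ct b h2 hb j hj] at hlt
        split_ifs at hthis hlt <;> omega
    · rw [if_neg hbad]
      rw [ih hzr (upd cs a) (upd ct b) h1' h2']
      constructor
      · intro h n hn hn' j hj
        obtain ⟨m, rfl⟩ : ∃ m, n = m + 1 := ⟨n - 1, by omega⟩
        have hm : m ≤ r.length := by simp at hn'; omega
        rcases Nat.eq_zero_or_pos m with hm0 | hm1
        · subst hm0
          -- n = 1 : the check after the first step did not fire
          have hnot : ¬ (upd cs a).getD j 0 < (upd ct b).getD j 0 := by
            intro hlt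
            exact hbad ((pyAnyLt_iff _ _ h1' h2').mpr ⟨j, hj, hlt⟩)
          rw [getD_upd cs a h1 ha j hj, getD_upd ct b h2 hb j hj] at hnot
          rw [etake, cntF_cons, cntT_cons, cntF_nil, cntT_nil]
          split_ifs at hnot ⊢ <;> omega
        · have hthis := h m hm1 hm j hj
          rw [getD_upd cs a h1 ha j hj, getD_upd ct b h2 hb j hj] at hthis
          rw [List.take_succ_cons, cntF_cons, cntT_cons]
          split_ifs at hthis ⊢ <;> omega
      · intro h m hm hm' j hj
        have hthis := h (m + 1) (by omega) (by simp; omega) j hj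
        rw [List.take_succ_cons, cntF_cons, cntT_cons] at hthis
        rw [getD_upd cs a h1 ha j hj, getD_upd ct b h2 hb j hj]
        split_ifs at hthis ⊢ <;> omega

lemma char_toNat_inj {a b : Char} (h : a.toNat = b.toNat) : a = b :=
  Char.ext (UInt32.toNat_inj.mp h)

lemma ofChars?_digit (a : Char) (ha : 48 ≤ a.toNat ∧ a.toNat ≤ 57) :
    PySem.Int.ofChars? [a] = some ((a.toNat : Int) - 48) := by
  have h0 : a.toNat = 48 ∨ a.toNat = 49 ∨ a.toNat = 50 ∨ a.toNat = 51 ∨ a.toNat = 52 ∨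
      a.toNat = 53 ∨ a.toNat = 54 ∨ a.toNat = 55 ∨ a.toNat = 56 ∨ a.toNat = 57 := by
    omega
  rcases h0 with h | h | h | h | h | h | h | h | h | h
  · have e : a = '0' := char_toNat_inj (h.trans (by decide))
    subst e; decide
  · have e : a = '1' := char_toNat_inj (h.trans (by decide))
    subst e; decide
  · have e : a = '2' := char_toNat_inj (h.trans (by decide))
    subst e; decide
  · have e : a = '3' := char_toNat_inj (h.trans (by decide))
    subst e; decide
  · have e : a = '4' := char_toNat_inj (h.trans (by decide))
    subst e; decide
  · have e : a = '5' := char_toNat_inj (h.trans (by decide))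
    subst e; decide
  · have e : a = '6' := char_toNat_inj (h.trans (by decide))
    subst e; decide
  · have e : a = '7' := char_toNat_inj (h.trans (by decide))
    subst e; decide
  · have e : a = '8' := char_toNat_inj (h.trans (by decide))
    subst e; decide
  · have e : a = '9' := char_toNat_inj (h.trans (by decide))
    subst e; decide

lemma goB_iff (j : Nat) (z : List (Char × Char))
    (hz : ∀ p ∈ z, (48 ≤ p.1.toNat ∧ p.1.toNat ≤ 57) ∧ (48 ≤ p.2.toNat ∧ p.2.toNat ≤ 57)) :
    ∀ diff : Int,
    (goB (j : Int) z diff = true ↔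
      ∀ n : Nat, 1 ≤ n → n ≤ z.length →
        ¬ (diff + cntF j (z.take n) - cntT j (z.take n) < 0)) := by
  induction z with
  | nil =>
    intro diff
    simp [goB]
    intro n hn hn'; omega
  | cons p r ih =>
    obtain ⟨a, b⟩ := p
    intro diff
    have hab := hz (a, b) (by simp)
    have ha : 48 ≤ a.toNat ∧ a.toNat ≤ 57 := by simpa using hab.1
    have hb : 48 ≤ b.toNat ∧ b.toNat ≤ 57 := by simpa using hab.2
    have hzr : ∀ p ∈ r, (48 ≤ p.1.toNat ∧ p.1.toNat ≤ 57) ∧ (48 ≤ p.2.toNat ∧ p.2.toNat ≤ 57) :=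
      fun p hp => hz p (by simp [hp])
    have ea : (if ((a.toNat : Int) - 48) = (j : Int) then (1 : Int) else 0) =
        (if a.toNat = 48 + j then (1 : Int) else 0) := by
      by_cases h : a.toNat = 48 + j
      · rw [if_pos (by omega : ((a.toNat : Int) - 48) = (j : Int)), if_pos h]
      · rw [if_neg (by omega : ¬ ((a.toNat : Int) - 48) = (j : Int)), if_neg h]
    have eb : (if ((b.toNat : Int) - 48) = (j : Int) then (1 : Int) else 0) =
        (if b.toNat = 48 + j then (1 : Int) else 0) := by
      by_cases h : b.toNat = 48 + j
      · rw [if_pos (by omega : ((b.toNat : Int) - 48) = (j : Int)), if_pos h]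
      · rw [if_neg (by omega : ¬ ((b.toNat : Int) - 48) = (j : Int)), if_neg h]
    have hstep : goB (j : Int) ((a, b) :: r) diff =
        (if diff + (if a.toNat = 48 + j then (1 : Int) else 0) -
            (if b.toNat = 48 + j then (1 : Int) else 0) < 0 then false
         else goB (j : Int) r (diff + (if a.toNat = 48 + j then (1 : Int) else 0) -
            (if b.toNat = 48 + j then (1 : Int) else 0))) := by
      show (match PySem.Int.ofChars? [a], PySem.Int.ofChars? [b] with
        | some x, some y =>
          if diff + (if x = (j : Int) then (1 : Int) else 0) -
              (if y = (j : Int) then (1 : Int) else 0) < 0 then false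
          else goB (j : Int) r (diff + (if x = (j : Int) then (1 : Int) else 0) -
              (if y = (j : Int) then (1 : Int) else 0))
        | _, _ => false) = _
      rw [ofChars?_digit a ha, ofChars?_digit b hb]
      simp only [ea, eb]
    rw [hstep]
    by_cases hneg : diff + (if a.toNat = 48 + j then (1 : Int) else 0) -
        (if b.toNat = 48 + j then (1 : Int) else 0) < 0
    · rw [if_pos hneg]
      constructor
      · intro h; exact absurd h (by simp)
      · intro h
        have hthis := h 1 (by omega) (by simp)
        rw [show ((a, b) :: r).take 1 = [(a, b)] from rfl, cntF_cons, cntT_cons,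
          cntF_nil, cntT_nil] at hthis
        split_ifs at hthis hneg <;> omega
    · rw [if_neg hneg, ih hzr _]
      constructor
      · intro h n hn hn'
        obtain ⟨m, rfl⟩ : ∃ m, n = m + 1 := ⟨n - 1, by omega⟩
        have hm : m ≤ r.length := by simp at hn'; omega
        rcases Nat.eq_zero_or_pos m with hm0 | hm1
        · subst hm0
          rw [show ((a, b) :: r).take 1 = [(a, b)] from rfl, cntF_cons, cntT_cons,
            cntF_nil, cntT_nil]
          split_ifs at hneg ⊢ <;> omega
        · have hthis := h m hm1 hm
          rw [List.take_succ_cons, cntF_cons, cntT_cons]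
          split_ifs at hthis hneg ⊢ <;> omega
      · intro h m hm hm'
        have hthis := h (m + 1) (by omega) (by simp; omega)
        rw [List.take_succ_cons, cntF_cons, cntT_cons] at hthis
        split_ifs at hthis hneg <;> omega

lemma can_sort_iff (s t : String) (hz : Pre_can_sort s t) :
    can_sort s t = true ↔
      ∀ n : Nat, 1 ≤ n → n ≤ (s.toList.zip t.toList).length → ∀ j < 10,
        ¬ (cntF j ((s.toList.zip t.toList).take n) < cntT j ((s.toList.zip t.toList).take n)) := by
  unfold can_sort
  rw [goA_iff _ hz (List.replicate 10 0) (List.replicate 10 0) (by simp) (by simp)]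
  constructor
  · intro h n h1 h2 j hj
    simpa using h n h1 h2 j hj
  · intro h n h1 h2 j hj
    simpa using h n h1 h2 j hj

lemma pyRange_ten : PySem.List.pyRange 0 10 1 = [0, 1, 2, 3, 4, 5, 6, 7, 8, 9] := by
  decide

lemma can_sort_alt_iff (s t : String) (hz : Pre_can_sort s t) :
    can_sort_alt s t = true ↔
      ∀ n : Nat, 1 ≤ n → n ≤ (s.toList.zip t.toList).length → ∀ j < 10,
        ¬ (cntF j ((s.toList.zip t.toList).take n) < cntT j ((s.toList.zip t.toList).take n)) := by
  unfold can_sort_alt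
  rw [List.all_eq_true]
  constructor
  · intro h n h1 h2 j hj
    have key : ∀ j : Nat, j < 10 → ((j : Int) ∈ PySem.List.pyRange 0 10 1) := by
      intro j hj'
      rw [pyRange_ten]
      interval_cases j <;> simp
    have hgb := (goB_iff j _ hz 0).mp (h _ (key j hj)) n h1 h2
    omega
  · intro h d hd
    rw [pyRange_ten] at hd
    have hd' : ∃ j : Nat, j < 10 ∧ (j : Int) = d := by
      fin_cases hd
      · exact ⟨0, by omega, rfl⟩
      · exact ⟨1, by omega, rfl⟩
      · exact ⟨2, by omega, rfl⟩
      · exact ⟨3, by omega, rfl⟩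
      · exact ⟨4, by omega, rfl⟩
      · exact ⟨5, by omega, rfl⟩
      · exact ⟨6, by omega, rfl⟩
      · exact ⟨7, by omega, rfl⟩
      · exact ⟨8, by omega, rfl⟩
      · exact ⟨9, by omega, rfl⟩
    obtain ⟨j, hj, rfl⟩ := hd'
    exact (goB_iff j _ hz 0).mpr (fun n h1 h2 => by
      have := h n h1 h2 j hj
      omega)

-- ===== VERDICT (by name: the statement is the Claim_ definition above) =====
theorem can_sort_spec : Claim_equal_can_sort := by
  intro s t _ hpre
  unfold Spec_can_sort
  have h1 := can_sort_iff s t hpre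
  have h2 := can_sort_alt_iff s t hpre
  cases hA : can_sort s t <;> cases hB : can_sort_alt s t
  · rfl
  · exact absurd (h1.mpr (h2.mp hB)) (by simp [hA])
  · exact absurd (h2.mpr (h1.mp hA)) (by simp [hB])
  · rfl
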